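-- pv_equiv track=rewrite | github.com/sonya3108/190924 | LVL_2_Python_group_2024/Exercise_4.py | count_key_presses
-- ===== SOURCE A (Python) =====
-- def count_key_presses(s: str) -> int:
--     key_presses = 0
--     caps_lock_on = False
--
--     for char in s:
--         if char.islower():
--             if caps_lock_on:
--                 key_presses += 1
--                 caps_lock_on = False
--             key_presses += 1  #
--
--         else:
--             if not caps_lock_on:
--                 key_presses += 1
--                 caps_lock_on = True
--             key_presses += 1
--
--     return key_presses
-- ===== SOURCE B (Python) =====
-- def count_key_presses(s: str) -> int:
--     # Run-counting closed form: each maximal run of non-lowercase characters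
--     # costs 2 extra toggles (caps on at its start, caps off afterwards),
--     # except the final run, which is never toggled off.
--     needs = [not c.islower() for c in s]
--     starts = sum(1 for prev, cur in zip([False] + needs, needs) if cur and not prev)
--     return len(s) + 2 * starts - (1 if needs and needs[-1] else 0)
-- ===== Notes on version B (the rewrite author's own statement) =====
-- stated objective: alternative
-- what changed: B replaces A's per-character caps-lock state machine with a staged run-counting closed form: it builds the need-sequence, counts starts of non-lowercase runs with a shifted zip, and returns len(s) + 2*starts minus 1 if the string ends in a non-lowercase run.
import Mathlib
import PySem

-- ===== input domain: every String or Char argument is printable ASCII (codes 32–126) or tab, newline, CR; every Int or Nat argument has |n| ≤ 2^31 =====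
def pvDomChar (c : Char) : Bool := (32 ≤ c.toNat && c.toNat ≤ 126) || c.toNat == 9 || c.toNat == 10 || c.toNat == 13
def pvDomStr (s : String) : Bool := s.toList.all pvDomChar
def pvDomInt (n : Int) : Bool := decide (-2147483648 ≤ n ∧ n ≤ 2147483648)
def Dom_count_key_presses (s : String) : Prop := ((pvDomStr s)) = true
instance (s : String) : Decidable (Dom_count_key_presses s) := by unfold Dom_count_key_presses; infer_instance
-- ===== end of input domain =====

-- B replaces A's caps-lock state machine by a run-counting closed form: len(s) + 2*(number of non-lowercase runs) - (1 if the last run is non-lowercase); alternative decomposition, same cost.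


-- ===== PORT A =====
-- loop over the characters with state (key_presses, caps_lock_on)
def ckpLoopA : List Char → Int → Bool → Int
  | [], k, _ => k
  | c :: rest, k, caps =>
    if PySem.Chars.islower c then
      if caps then ckpLoopA rest (k + 1 + 1) false
      else ckpLoopA rest (k + 1) caps
    else
      if !caps then ckpLoopA rest (k + 1 + 1) true
      else ckpLoopA rest (k + 1) caps

def count_key_presses (s : String) : Int := ckpLoopA s.toList 0 false

-- ===== PORT B =====
-- staged: need-sequence, count starts of non-lowercase runs via a shifted zip, closed form
def count_key_presses_alt (s : String) : Int :=
  let needs := s.toList.map (fun c => !(PySem.Chars.islower c))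
  let starts := ((false :: needs).zip needs).countP (fun p => p.2 && !p.1)
  (s.toList.length : Int) + 2 * (starts : Int) - (if needs.getLastD false then 1 else 0)

-- ===== PRECONDITION & SPEC =====
def Spec_count_key_presses (s : String) (out : Int) : Prop := out = count_key_presses_alt s
instance (s : String) (out : Int) : Decidable (Spec_count_key_presses s out) := by unfold Spec_count_key_presses; infer_instance

-- ===== CLAIM (what is proved, stated in full; the proofs are below) =====
def Claim_equal_count_key_presses : Prop := ∀ (s : String), Dom_count_key_presses s → Spec_count_key_presses s (count_key_presses s)

-- ===== LEMMAS AND PROOFS =====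
-- number of run starts (cur ∧ ¬prev) in a boolean sequence, given the previous value
def ckpUps : Bool → List Bool → Nat
  | _, [] => 0
  | p, c :: r => (if c && !p then 1 else 0) + ckpUps c r

theorem ckpUps_eq_countP (l : List Bool) (p : Bool) :
    ckpUps p l = ((p :: l).zip l).countP (fun q => q.2 && !q.1) := by
  induction l generalizing p with
  | nil => simp [ckpUps]
  | cons c r ih =>
    simp only [List.zip_cons_cons, List.countP_cons, ← ih c, ckpUps]
    cases c <;> cases p <;> (simp; try omega)

theorem ckpLoopA_closed (l : List Char) (k : Int) (p : Bool) :
    ckpLoopA l k p = k + (l.length : Int)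
      + 2 * (ckpUps p (l.map (fun c => !(PySem.Chars.islower c))) : Int)
      - (if (l.map (fun c => !(PySem.Chars.islower c))).getLastD p then 1 else 0)
      + (if p then 1 else 0) := by
  induction l generalizing k p with
  | nil => cases p <;> simp [ckpLoopA, ckpUps]
  | cons c rest ih =>
    cases hlow : PySem.Chars.islower c <;> cases p <;>
      simp only [ckpLoopA, hlow, Bool.not_true, Bool.not_false, if_true, if_false,
        List.map_cons, List.length_cons, List.getLastD_cons, ckpUps, ih,
        Bool.and_true, Bool.and_false, Bool.and_self,
        Bool.false_eq_true] <;>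
      push_cast <;> ring

-- ===== VERDICT (by name: the statement is the Claim_ definition above) =====
theorem count_key_presses_spec : Claim_equal_count_key_presses := by
  intro s _
  unfold Spec_count_key_presses count_key_presses count_key_presses_alt
  rw [ckpLoopA_closed, ckpUps_eq_countP]
  simp
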